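-- pv_equiv track=rewrite | github.com/ThenTech/BDA-Assignments | Plagiarism/Resources/submissions/submissions/2205422.py | remove_upper
-- ===== SOURCE A (Python) =====
-- def remove_upper(sans_punc):
--     sans_upper = ""
--     for i in sans_punc:
--         if "A" <= i <= "Z":
--             result = chr(ord(i) - ord("A") + ord("a"))
--             sans_upper += result
--         else:
--             sans_upper += i
--     return is_palindrome_sentence(sans_upper)
--
-- def is_palindrome_sentence(sans_upper):
--     palin = True
--     for i in range(len(sans_upper)):
--         palin = sans_upper[i] == sans_upper[len(sans_upper) - i - 1]
--         if palin:
--             i += 1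
--         else:
--             return palin
--     return palin
-- ===== SOURCE B (Python) =====
-- def remove_upper(sans_punc):
--     sans_upper = "".join(chr(ord(c) - ord("A") + ord("a")) if "A" <= c <= "Z" else c
--                          for c in sans_punc)
--     return sans_upper == sans_upper[::-1]
-- ===== Notes on version B (the rewrite author's own statement) =====
-- stated objective: idiomatic
-- what changed: Replaces the helper's early-exit index loop over symmetric positions with inlining the ASCII lowercasing into a join comprehension and the whole-string comparison s == s[::-1].
import Mathlib
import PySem

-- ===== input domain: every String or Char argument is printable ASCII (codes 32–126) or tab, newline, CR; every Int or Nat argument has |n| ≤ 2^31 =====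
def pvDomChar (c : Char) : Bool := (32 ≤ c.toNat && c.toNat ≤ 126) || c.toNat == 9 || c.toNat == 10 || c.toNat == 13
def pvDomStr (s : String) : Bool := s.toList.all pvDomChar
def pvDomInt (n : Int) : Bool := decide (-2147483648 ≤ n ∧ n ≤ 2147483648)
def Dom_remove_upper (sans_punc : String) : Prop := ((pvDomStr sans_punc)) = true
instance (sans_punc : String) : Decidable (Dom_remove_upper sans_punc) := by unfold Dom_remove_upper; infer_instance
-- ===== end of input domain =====

-- B inlines the lowercasing into one pass and checks palindromicity by whole-list
-- reverse-and-compare instead of A's early-exit symmetric-index loop (objective: idiomatic).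


-- ===== PORT A =====
-- the `for i in range(len(sans_upper))` loop of is_palindrome_sentence, with its early return
def pvPalinLoop (l : List Char) (n i : Nat) : Bool :=
  if i < n then
    if PySem.List.pyGetD l (i : Int) ' ' == PySem.List.pyGetD l ((n : Int) - (i : Int) - 1) ' '
    then pvPalinLoop l n (i + 1) else false
  else true
  termination_by n - i

def remove_upper (sans_punc : String) : Bool :=
  let sans_upper := sans_punc.toList.foldl
    (fun acc c => if 'A' ≤ c ∧ c ≤ 'Z'
                  then acc ++ [Char.ofNat (c.toNat - 'A'.toNat + 'a'.toNat)]
                  else acc ++ [c]) []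
  pvPalinLoop sans_upper sans_upper.length 0

-- ===== PORT B =====
-- chr(ord(c) - ord("A") + ord("a")) for "A" <= c <= "Z", else c unchanged
def pvLower (c : Char) : Char :=
  if 'A' ≤ c ∧ c ≤ 'Z' then Char.ofNat (c.toNat - 'A'.toNat + 'a'.toNat) else c

def remove_upper_alt (sans_punc : String) : Bool :=
  let sans_upper := sans_punc.toList.map pvLower
  sans_upper == sans_upper.reverse

-- ===== PRECONDITION & SPEC =====
def Spec_remove_upper (sans_punc : String) (out : Bool) : Prop := out = remove_upper_alt sans_punc
instance (sans_punc : String) (out : Bool) : Decidable (Spec_remove_upper sans_punc out) := by unfold Spec_remove_upper; infer_instance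

-- ===== CLAIM (what is proved, stated in full; the proofs are below) =====
def Claim_equal_remove_upper : Prop := ∀ (sans_punc : String), Dom_remove_upper sans_punc → Spec_remove_upper sans_punc (remove_upper sans_punc)

-- ===== LEMMAS AND PROOFS =====

theorem pvLowerFold_eq_map (l : List Char) :
    l.foldl (fun acc c => if 'A' ≤ c ∧ c ≤ 'Z'
                          then acc ++ [Char.ofNat (c.toNat - 'A'.toNat + 'a'.toNat)]
                          else acc ++ [c]) []
      = l.map pvLower := by
  have h : (fun (acc : List Char) c => if 'A' ≤ c ∧ c ≤ 'Z'
                          then acc ++ [Char.ofNat (c.toNat - 'A'.toNat + 'a'.toNat)]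
                          else acc ++ [c])
      = fun acc c => acc ++ [pvLower c] := by
    funext acc c
    by_cases hc : 'A' ≤ c ∧ c ≤ 'Z' <;> simp [pvLower, hc]
  rw [h]
  simpa using PySem.List.foldl_append_singleton_eq_map pvLower l []

theorem pvPalinLoop_iff (l : List Char) (i : Nat) :
    pvPalinLoop l l.length i = true ↔
      ∀ j, i ≤ j → (hj : j < l.length) → l[j] = l[l.length - 1 - j]'(by omega) := by
  generalize hm : l.length - i = m
  induction m generalizing i with
  | zero =>
      rw [pvPalinLoop]
      simp only [if_neg (by omega : ¬ i < l.length)]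
      constructor
      · intro _ j hij hj; omega
      · intro _; trivial
  | succ m ih =>
      have hi : i < l.length := by omega
      rw [pvPalinLoop]
      rw [if_pos hi]
      have g1 : PySem.List.pyGetD l (i : Int) ' ' = l[i] := by
        rw [PySem.List.pyGetD_natCast]; simp [List.getD, hi]
      have g2 : PySem.List.pyGetD l ((l.length : Int) - (i : Int) - 1) ' '
          = l[l.length - 1 - i]'(by omega) := by
        have he : (l.length : Int) - (i : Int) - 1 = ((l.length - 1 - i : Nat) : Int) := by omega
        rw [he, PySem.List.pyGetD_natCast]
        simp [List.getD, (by omega : l.length - 1 - i < l.length)]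
      rw [g1, g2]
      by_cases hp : l[i] = l[l.length - 1 - i]'(by omega)
      · rw [if_pos (by simp [hp])]
        rw [ih (i + 1) (by omega)]
        constructor
        · intro h j hij hj
          rcases Nat.eq_or_lt_of_le hij with rfl | hlt
          · exact hp
          · exact h j hlt hj
        · intro h j hij hj; exact h j (by omega) hj
      · rw [if_neg (by simpa using hp)]
        simp only [Bool.false_eq_true, false_iff]
        intro h
        exact hp (h i le_rfl hi)

theorem palindrome_iff (l : List Char) :
    l = l.reverse ↔ ∀ j, (hj : j < l.length) → l[j] = l[l.length - 1 - j]'(by omega) := by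
  constructor
  · intro h j hj
    rw [List.getElem_of_eq h hj, List.getElem_reverse]
  · intro h
    apply List.ext_getElem (by simp)
    intro j hj hj'
    rw [List.getElem_reverse]
    exact h j hj

-- ===== VERDICT (by name: the statement is the Claim_ definition above) =====
theorem remove_upper_spec : Claim_equal_remove_upper := by
  intro s _
  unfold Spec_remove_upper remove_upper remove_upper_alt
  rw [pvLowerFold_eq_map]
  set l := s.toList.map pvLower with hl
  by_cases h : l = l.reverse
  · have h1 : pvPalinLoop l l.length 0 = true := by
      rw [pvPalinLoop_iff]
      intro j _ hj
      exact (palindrome_iff l).mp h j hj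
    rw [h1, eq_comm, beq_iff_eq]
    exact h
  · have h1 : pvPalinLoop l l.length 0 = false := by
      rw [← Bool.not_eq_true, pvPalinLoop_iff]
      intro hc
      exact h ((palindrome_iff l).mpr (fun j hj => hc j (Nat.zero_le j) hj))
    rw [h1, eq_comm, beq_eq_false_iff_ne]
    exact h
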